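-- pv_equiv track=rewrite | github.com/paddygregory/chap10thinkpython | 10.9_exercises.py | add_counters
-- ===== SOURCE A (Python) =====
-- def add_counters(d1,d2):
--     result = d1.copy()
--     for key, value in d2.items():
--         if key in result:
--             result[key] += value
--         else:
--             result[key] = value
--     return result
-- ===== SOURCE B (Python) =====
-- def add_counters(d1, d2):
--     # Grouping approach: list every (key, value) pair of both dicts, then for
--     # each key (first-occurrence order) compute its total by scanning all pairs.
--     pairs = list(d1.items()) + list(d2.items())
--     result = {}
--     for key, _ in pairs:
--         if key not in result:
--             result[key] = sum(v for k, v in pairs if k == key)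
--     return result
-- ===== Notes on version B (the rewrite author's own statement) =====
-- stated objective: alternative
-- what changed: A copies d1 and accumulates d2 into it with an add-or-insert pass; B instead concatenates all (key, value) pairs of both dicts and groups them: for each key in first-occurrence order it computes the key's total by scanning the whole pair list with sum(), never updating a value incrementally.
import Mathlib
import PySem

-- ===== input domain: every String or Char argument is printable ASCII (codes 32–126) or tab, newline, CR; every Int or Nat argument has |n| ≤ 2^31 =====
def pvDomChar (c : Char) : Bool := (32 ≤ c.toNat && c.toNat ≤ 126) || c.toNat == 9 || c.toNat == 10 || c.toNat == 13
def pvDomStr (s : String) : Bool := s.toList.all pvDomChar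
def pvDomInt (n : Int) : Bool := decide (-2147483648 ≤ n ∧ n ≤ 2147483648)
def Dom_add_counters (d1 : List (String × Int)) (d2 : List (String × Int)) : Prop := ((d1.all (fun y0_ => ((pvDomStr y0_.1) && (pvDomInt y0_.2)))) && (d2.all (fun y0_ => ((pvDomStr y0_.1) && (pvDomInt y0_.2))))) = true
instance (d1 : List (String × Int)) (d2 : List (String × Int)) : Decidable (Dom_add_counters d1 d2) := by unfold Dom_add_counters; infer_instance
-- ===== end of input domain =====

-- B replaces A's copy-then-accumulate merge by grouping: concatenate all pairs
-- of both dicts and, for each key in first-occurrence order, total its values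
-- by a full scan (alternative decomposition, not faster).

-- ===== PORT A =====
def add_counters (d1 : List (String × Int)) (d2 : List (String × Int)) : List (String × Int) :=
  (d2.foldl (fun result p =>
      if result.contains p.1 then result.insert p.1 (result.getD p.1 0 + p.2)
      else result.insert p.1 p.2)
    (PySem.Dict.mk d1)).items

-- ===== PORT B =====
def add_counters_alt (d1 : List (String × Int)) (d2 : List (String × Int)) : List (String × Int) :=
  -- pairs = list(d1.items()) + list(d2.items())
  let pairs := d1 ++ d2
  -- for key, _ in pairs: if key not in result: result[key] = sum(v for k, v in pairs if k == key)
  (pairs.foldl (fun result p =>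
      if result.contains p.1 then result
      else result.insert p.1 (((pairs.filter (fun q => q.1 == p.1)).map Prod.snd).sum))
    PySem.Dict.empty).items

-- ===== PRECONDITION & SPEC =====
-- Pre_: the association lists stand for Python dicts, whose keys are unique;
-- lists with duplicate keys correspond to no Python input, so they are excluded.
def Pre_add_counters (d1 : List (String × Int)) (d2 : List (String × Int)) : Prop :=
  (d1.map Prod.fst).Nodup ∧ (d2.map Prod.fst).Nodup
instance (d1 : List (String × Int)) (d2 : List (String × Int)) : Decidable (Pre_add_counters d1 d2) := by unfold Pre_add_counters; infer_instance
def pvWitness_add_counters : (List (String × Int)) × (List (String × Int)) :=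
  ([("a", 1), ("b", 2)], [("b", 3), ("c", 4)])
def Spec_add_counters (d1 : List (String × Int)) (d2 : List (String × Int)) (out : List (String × Int)) : Prop := out = add_counters_alt d1 d2
instance (d1 : List (String × Int)) (d2 : List (String × Int)) (out : List (String × Int)) : Decidable (Spec_add_counters d1 d2 out) := by unfold Spec_add_counters; infer_instance

-- ===== CLAIM (what is proved, stated in full; the proofs are below) =====
def Claim_equal_add_counters : Prop := ∀ (d1 : List (String × Int)) (d2 : List (String × Int)), Dom_add_counters d1 d2 → Pre_add_counters d1 d2 → Spec_add_counters d1 d2 (add_counters d1 d2)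

-- ===== LEMMAS AND PROOFS =====

-- lookup in a literal dict built from an appended list: first match wins
theorem pvGet?_mk_append (xs ys : List (String × Int)) (k : String) :
    (PySem.Dict.mk (xs ++ ys)).get? k =
      ((PySem.Dict.mk xs).get? k).or ((PySem.Dict.mk ys).get? k) := by
  induction xs with
  | nil => simp; rfl
  | cons x xs ih =>
    rw [List.cons_append, PySem.Dict.get?_mk_cons, PySem.Dict.get?_mk_cons]
    by_cases h : x.1 == k <;> simp [h, ih]

-- lookup in a dict whose entries had their values rewritten key-wise
theorem pvGet?_mk_map (d1 : List (String × Int)) (g : String → Int → Int) (k : String) :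
    (PySem.Dict.mk (d1.map (fun p => (p.1, g p.1 p.2)))).get? k =
      ((PySem.Dict.mk d1).get? k).map (g k) := by
  induction d1 with
  | nil => rfl
  | cons x xs ih =>
    rw [List.map_cons, PySem.Dict.get?_mk_cons, PySem.Dict.get?_mk_cons]
    by_cases h : x.1 == k
    · have : x.1 = k := by simpa using h
      subst this; simp
    · simp [h, ih]

-- appending one fresh entry is insertion
theorem pvMk_append_singleton (l : List (String × Int)) (x : String × Int)
    (hx : x.1 ∉ l.map Prod.fst) :
    PySem.Dict.mk (l ++ [x]) = (PySem.Dict.mk l).insert x.1 x.2 := by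
  apply PySem.Dict.ext
  rw [PySem.Dict.items_insert_of_not_contains]
  rw [PySem.Dict.contains_eq_decide_mem_keys, PySem.Dict.keys_mk]
  simpa using hx

-- value rewritten by A's loop, applied to the key list of d1
def pvMapA (d1 l : List (String × Int)) : List (String × Int) :=
  d1.map (fun p => (p.1, p.2 + (PySem.Dict.mk l).getD p.1 0))

def pvFilt (d1 l : List (String × Int)) : List (String × Int) :=
  l.filter (fun p => !((d1.map Prod.fst).contains p.1))

-- characterisation of A's accumulate loop
theorem pvA_char (d1 : List (String × Int)) (h1 : (d1.map Prod.fst).Nodup) :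
    ∀ (l : List (String × Int)), (l.map Prod.fst).Nodup →
      (l.foldl (fun result p =>
          if result.contains p.1 then result.insert p.1 (result.getD p.1 0 + p.2)
          else result.insert p.1 p.2) (PySem.Dict.mk d1)).items
        = pvMapA d1 l ++ pvFilt d1 l := by
  intro l
  induction l using List.reverseRecOn with
  | nil =>
    intro _
    unfold pvMapA pvFilt
    simp only [List.filter_nil, List.append_nil, List.foldl_nil]
    show ({ items := d1 } : PySem.Dict String Int).items = _
    refine (((List.map_congr_left ?_).trans (List.map_id _)).symm : d1 = _)
    intro p _
    have : (PySem.Dict.mk ([] : List (String × Int))).getD p.1 0 = 0 := rfl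
    rw [this, Int.add_zero]
    rfl
  | append_singleton l x ih =>
    intro hnd
    rw [List.map_append, List.nodup_append] at hnd
    obtain ⟨hl, _, hdisj⟩ := hnd
    have hxl : x.1 ∉ l.map Prod.fst := fun h => hdisj _ h x.1 (by simp) rfl
    rw [List.foldl_append, List.foldl_cons, List.foldl_nil,
      PySem.Dict.ext (ih hl) (y := PySem.Dict.mk (pvMapA d1 l ++ pvFilt d1 l))]
    have hlget : (PySem.Dict.mk l).getD x.1 0 = 0 := by
      rw [PySem.Dict.getD_eq_get?_getD,
        (PySem.Dict.get?_eq_none_iff_not_mem_keys _ _).2 (by rw [PySem.Dict.keys_mk]; exact hxl)]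
      rfl
    by_cases hx : x.1 ∈ d1.map Prod.fst
    · have hc : (PySem.Dict.mk (pvMapA d1 l ++ pvFilt d1 l)).contains x.1 = true := by
        rw [PySem.Dict.contains_eq_decide_mem_keys, PySem.Dict.keys_mk]
        simp only [decide_eq_true_eq, List.map_append, List.mem_append]
        left
        simpa [pvMapA, List.map_map, Function.comp_def] using hx
      have hne : (PySem.Dict.mk d1).get? x.1 ≠ none := by
        rw [Ne, PySem.Dict.get?_eq_none_iff_not_mem_keys, PySem.Dict.keys_mk]
        simpa using hx
      obtain ⟨v, hv⟩ := Option.ne_none_iff_exists'.mp hne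
      have hget : (PySem.Dict.mk (pvMapA d1 l ++ pvFilt d1 l)).getD x.1 0 = v := by
        rw [PySem.Dict.getD_eq_get?_getD]
        unfold pvMapA pvFilt
        rw [pvGet?_mk_append,
          pvGet?_mk_map d1 (fun k w => w + (PySem.Dict.mk l).getD k 0) x.1, hv]
        simp [hlget]
      rw [hc, if_pos rfl, PySem.Dict.items_insert_of_contains _ _ hc, hget, List.map_append]
      congr 1
      · unfold pvMapA
        rw [List.map_map, pvMk_append_singleton l x hxl]
        apply List.map_congr_left
        intro p hp
        simp only [Function.comp_apply, PySem.Dict.getD_insert]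
        by_cases hpx : p.1 = x.1
        · have hpv : (PySem.Dict.mk d1).get? p.1 = some p.2 :=
            PySem.Dict.get?_of_mem_items (PySem.Dict.mk d1) (k := p.1) (v := p.2)
              (by simpa using hp) (by rw [PySem.Dict.keys_mk]; exact h1)
          rw [hpx] at hpv
          have : v = p.2 := Option.some.inj (hv ▸ hpv)
          simp [hpx, this]
        · have hb : (p.1 == x.1) = false := by simpa using hpx
          simp [hpx, hb]
      · unfold pvFilt
        have hxf : ((d1.map Prod.fst).contains x.1) = true := by simpa using hx
        simp only [List.filter_append, List.filter_singleton, hxf, Bool.not_true,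
          cond_false, List.append_nil]
        apply (List.map_congr_left ?_).trans (List.map_id _)
        intro p hp
        have hp1 : p.1 ∉ d1.map Prod.fst := by simpa using List.of_mem_filter hp
        have hne : (p.1 == x.1) = false := by
          simp only [beq_eq_false_iff_ne, ne_eq]
          exact fun h => hp1 (h ▸ hx)
        simp [hne]
    · have hc : (PySem.Dict.mk (pvMapA d1 l ++ pvFilt d1 l)).contains x.1 = false := by
        rw [PySem.Dict.contains_eq_decide_mem_keys, PySem.Dict.keys_mk]
        simp only [decide_eq_false_iff_not, List.map_append, List.mem_append]
        rintro (h | h)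
        · exact hx (by simpa [pvMapA, List.map_map, Function.comp_def] using h)
        · unfold pvFilt at h
          obtain ⟨p, hp, hpk⟩ := List.mem_map.1 h
          exact hxl (hpk ▸ List.mem_map_of_mem (List.mem_of_mem_filter hp))
      rw [hc, if_neg (by simp), PySem.Dict.items_insert_of_not_contains _ _ hc]
      have hm : pvMapA d1 (l ++ [x]) = pvMapA d1 l := by
        unfold pvMapA
        rw [pvMk_append_singleton l x hxl]
        apply List.map_congr_left
        intro p hp
        have hpx : p.1 ≠ x.1 := fun h => hx (h ▸ List.mem_map_of_mem hp)
        simp [PySem.Dict.getD_insert, hpx]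
      have hf : pvFilt d1 (l ++ [x]) = pvFilt d1 l ++ [x] := by
        unfold pvFilt
        have hxt : ((d1.map Prod.fst).contains x.1) = false := by simpa using hx
        simp only [List.filter_append, List.filter_singleton, hxt, Bool.not_false, cond_true]
      rw [hm, hf, List.append_assoc]

-- ===== B-side characterisation =====

-- the per-key total B computes by its inner scan
def pvS (pairs : List (String × Int)) (k : String) : Int :=
  ((pairs.filter (fun q => q.1 == k)).map Prod.snd).sum

-- first-occurrence key order, skipping a seen-set
def pvFirst : List (String × Int) → List String → List String
  | [], _ => []
  | p :: rest, seen =>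
      if p.1 ∈ seen then pvFirst rest seen else p.1 :: pvFirst rest (p.1 :: seen)

theorem pvFirst_congr : ∀ (l : List (String × Int)) (s t : List String),
    (∀ k, k ∈ s ↔ k ∈ t) → pvFirst l s = pvFirst l t := by
  intro l
  induction l with
  | nil => intro _ _ _; rfl
  | cons p rest ih =>
    intro s t h
    unfold pvFirst
    by_cases hp : p.1 ∈ s
    · rw [if_pos hp, if_pos ((h p.1).1 hp), ih s t h]
    · rw [if_neg hp, if_neg (fun hmem => hp ((h p.1).2 hmem)),
        ih (p.1 :: s) (p.1 :: t) (by intro k; simp [h k])]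

-- B's grouping loop appends, for each unseen key in order, the key's total
theorem pvB_fold (pairs : List (String × Int)) :
    ∀ (l : List (String × Int)) (acc : PySem.Dict String Int),
      (l.foldl (fun result p =>
          if result.contains p.1 then result
          else result.insert p.1 (pvS pairs p.1)) acc).items
        = acc.items ++ (pvFirst l acc.keys).map (fun k => (k, pvS pairs k)) := by
  intro l
  induction l with
  | nil => intro acc; simp [pvFirst]
  | cons p rest ih =>
    intro acc
    rw [List.foldl_cons]
    unfold pvFirst
    by_cases hc : acc.contains p.1 = true
    · have hmem : p.1 ∈ acc.keys := by
        rw [PySem.Dict.contains_eq_decide_mem_keys] at hc; simpa using hc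
      rw [hc, if_pos rfl, if_pos hmem, ih]
    · have hc' : acc.contains p.1 = false := by simpa using hc
      have hmem : p.1 ∉ acc.keys := by
        rw [PySem.Dict.contains_eq_decide_mem_keys] at hc'; simpa using hc'
      rw [hc', if_neg (by simp), if_neg hmem, ih]
      rw [PySem.Dict.items_insert_of_not_contains _ _ hc',
        PySem.Dict.keys_insert_of_not_contains _ _ hc',
        pvFirst_congr rest (acc.keys ++ [p.1]) (p.1 :: acc.keys) (by intro k; simp; tauto)]
      simp

-- with unique keys, pvFirst is a filter against the seen-set
theorem pvFirst_of_nodup : ∀ (l : List (String × Int)) (seen : List String),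
    (l.map Prod.fst).Nodup →
    pvFirst l seen = (l.map Prod.fst).filter (fun k => !seen.contains k) := by
  intro l
  induction l with
  | nil => intro _ _; rfl
  | cons p rest ih =>
    intro seen hnd
    rw [List.map_cons, List.nodup_cons] at hnd
    obtain ⟨hp, hrest⟩ := hnd
    unfold pvFirst
    rw [List.map_cons, List.filter_cons]
    by_cases hs : p.1 ∈ seen
    · have : (!seen.contains p.1) = false := by simpa using hs
      rw [if_pos hs, this, if_neg (by simp), ih seen hrest]
    · have : (!seen.contains p.1) = true := by simpa using hs
      rw [if_neg hs, this, if_pos rfl, ih (p.1 :: seen) hrest]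
      congr 1
      apply List.filter_congr
      intro k hk
      have : k ≠ p.1 := fun h => hp (h ▸ hk)
      simp [this]

-- running pvFirst through fresh distinct keys lists them and extends the seen-set
theorem pvFirst_append_fresh : ∀ (l1 : List (String × Int)) (seen : List String),
    (l1.map Prod.fst).Nodup → (∀ k ∈ l1.map Prod.fst, k ∉ seen) →
    ∀ (l2 : List (String × Int)),
      pvFirst (l1 ++ l2) seen = l1.map Prod.fst ++ pvFirst l2 (l1.map Prod.fst ++ seen) := by
  intro l1
  induction l1 with
  | nil => intro seen _ _ l2; simp
  | cons p rest ih =>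
    intro seen hnd hfresh l2
    rw [List.map_cons, List.nodup_cons] at hnd
    obtain ⟨hp, hrest⟩ := hnd
    rw [List.cons_append]
    unfold pvFirst
    rw [if_neg (hfresh p.1 (by simp))]
    rw [ih (p.1 :: seen) hrest
      (by intro k hk
          simp only [List.mem_cons, not_or]
          exact ⟨fun h => hp (h ▸ hk), hfresh k (by simp [hk])⟩) l2]
    rw [pvFirst_congr l2 (rest.map Prod.fst ++ (p.1 :: seen))
      ((p :: rest).map Prod.fst ++ seen) (by intro k; simp; tauto)]
    simp
    cases l2 <;> rfl

-- a key absent from the key list filters to nothing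
theorem pvFilter_nil (l : List (String × Int)) (k : String) (h : k ∉ l.map Prod.fst) :
    l.filter (fun q => q.1 == k) = [] := by
  rw [List.filter_eq_nil_iff]
  intro q hq
  simp only [beq_eq_false_iff_ne, ne_eq, Bool.not_eq_true]
  intro he
  exact h (by simpa using (he ▸ List.mem_map_of_mem hq : (k : String) ∈ l.map Prod.fst))

-- with unique keys, a present key filters to exactly its own pair
theorem pvFilter_self (p : String × Int) : ∀ (l : List (String × Int)),
    p ∈ l → (l.map Prod.fst).Nodup → l.filter (fun q => q.1 == p.1) = [p] := by
  intro l
  induction l with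
  | nil => intro hm _; cases hm
  | cons x rest ih =>
    intro hm hnd
    rw [List.map_cons, List.nodup_cons] at hnd
    obtain ⟨hx, hrest⟩ := hnd
    rw [List.filter_cons]
    rcases List.mem_cons.1 hm with hm | hm
    · subst hm
      rw [if_pos (by simp), pvFilter_nil rest p.1 hx]
    · have : p.1 ∈ rest.map Prod.fst := List.mem_map_of_mem hm
      have hne : (x.1 == p.1) = false := by
        simp only [beq_eq_false_iff_ne, ne_eq]
        exact fun h => hx (h ▸ this)
      rw [hne, if_neg (by simp), ih hm hrest]

-- the d2-side contribution to a key's total is the d2 lookup (default 0)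
theorem pvS_d2 (d2 : List (String × Int)) (k : String) (hnd : (d2.map Prod.fst).Nodup) :
    ((d2.filter (fun q => q.1 == k)).map Prod.snd).sum = (PySem.Dict.mk d2).getD k 0 := by
  by_cases hk : k ∈ d2.map Prod.fst
  · obtain ⟨p, hp, hpk⟩ := List.mem_map.1 hk
    have := pvFilter_self p d2 hp hnd
    rw [hpk] at this
    rw [this]
    rw [PySem.Dict.getD_eq_get?_getD,
      PySem.Dict.get?_of_mem_items (PySem.Dict.mk d2) (k := k) (v := p.2)
        (by simpa [← hpk] using hp) (by rw [PySem.Dict.keys_mk]; exact hnd)]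
    simp
  · rw [pvFilter_nil d2 k hk,
      PySem.Dict.getD_eq_get?_getD,
      (PySem.Dict.get?_eq_none_iff_not_mem_keys _ _).2 (by rw [PySem.Dict.keys_mk]; exact hk)]
    rfl

-- ===== VERDICT (by name: the statement is the Claim_ definition above) =====
theorem add_counters_spec : Claim_equal_add_counters := by
  intro d1 d2 _ hpre
  obtain ⟨h1, h2⟩ := hpre
  unfold Spec_add_counters add_counters add_counters_alt
  rw [pvA_char d1 h1 d2 h2]
  show _ = (List.foldl _ PySem.Dict.empty _).items
  rw [show (fun (result : PySem.Dict String Int) (p : String × Int) =>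
        if result.contains p.1 then result
        else result.insert p.1 ((((d1 ++ d2).filter (fun q => q.1 == p.1)).map Prod.snd).sum))
      = (fun result p => if result.contains p.1 then result
          else result.insert p.1 (pvS (d1 ++ d2) p.1)) from rfl]
  rw [pvB_fold (d1 ++ d2) (d1 ++ d2) PySem.Dict.empty]
  have hkeys : (PySem.Dict.empty : PySem.Dict String Int).keys = [] := rfl
  rw [hkeys,
    pvFirst_append_fresh d1 [] h1 (by simp) d2,
    pvFirst_of_nodup d2 (d1.map Prod.fst ++ []) h2]
  have hempty : (PySem.Dict.empty : PySem.Dict String Int).items = [] := rfl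
  rw [hempty, List.nil_append, List.map_append]
  congr 1
  · -- d1-part: each key's total is its d1 value plus the d2 lookup
    unfold pvMapA
    rw [List.map_map]
    apply List.map_congr_left
    intro p hp
    simp only [Function.comp_apply]
    unfold pvS
    rw [List.filter_append, List.map_append, List.sum_append,
      pvFilter_self p d1 hp h1, pvS_d2 d2 p.1 h2]
    simp
  · -- d2-part: keys absent from d1 keep their d2 value
    unfold pvFilt
    have hswap : ((d2.map Prod.fst).filter (fun k => !(d1.map Prod.fst).contains k))
        = (d2.filter (fun p => !(d1.map Prod.fst).contains p.1)).map Prod.fst := by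
      rw [List.filter_map]
      rfl
    rw [List.append_nil, hswap, List.map_map]
    symm
    apply (List.map_congr_left ?_).trans (List.map_id _)
    intro p hp
    have hp2 : p ∈ d2 := List.mem_of_mem_filter hp
    have hp1 : p.1 ∉ d1.map Prod.fst := by simpa using List.of_mem_filter hp
    simp only [Function.comp_apply]
    unfold pvS
    rw [List.filter_append, List.map_append, List.sum_append,
      pvFilter_nil d1 p.1 hp1, pvFilter_self p d2 hp2 h2]
    simp
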